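-- pv_equiv track=rewrite | github.com/tirth5627/nlp | Lab 9/WordPiece.py | merge_symbols
-- ===== SOURCE A (Python) =====
-- def merge_symbols(pair, word_symbols):
--     symbol1, symbol2 = pair
--     y_clean = symbol2[2:] if symbol2.startswith('##') else symbol2
--     new_symbol = symbol1 + y_clean
--
--     new_word_symbols = {}
--     for word, symbols in word_symbols.items():
--         new_symbols = []
--         i = 0
--         while i < len(symbols):
--             if i < len(symbols) - 1 and symbols[i] == symbol1 and symbols[i + 1] == symbol2:
--                 new_symbols.append(new_symbol)
--                 i += 2
--             else:
--                 new_symbols.append(symbols[i])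
--                 i += 1
--         new_word_symbols[word] = new_symbols
--
--     return new_word_symbols, new_symbol
-- ===== SOURCE B (Python) =====
-- def merge_symbols(pair, word_symbols):
--     symbol1, symbol2 = pair
--     new_symbol = symbol1 + (symbol2[2:] if symbol2.startswith('##') else symbol2)
--
--     def merged(symbols):
--         # single pass with a one-symbol lookbehind: 'pending' means an
--         # unconsumed symbol1 was just seen and may still merge with symbol2
--         out = []
--         pending = False
--         for s in symbols:
--             if pending:
--                 if s == symbol2:
--                     out.append(new_symbol)
--                     pending = False
--                 elif s == symbol1:
--                     out.append(symbol1)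
--                 else:
--                     out.append(symbol1)
--                     out.append(s)
--                     pending = False
--             elif s == symbol1:
--                 pending = True
--             else:
--                 out.append(s)
--         if pending:
--             out.append(symbol1)
--         return out
--
--     return {w: merged(syms) for w, syms in word_symbols.items()}, new_symbol
-- ===== Notes on version B (the rewrite author's own statement) =====
-- stated objective: alternative
-- what changed: Replaces A's index-based while loop with lookahead (symbols[i], symbols[i+1], i += 2/1) by a single forward pass carrying a one-element 'pending symbol1' state that is flushed or merged on the next symbol; the dict is rebuilt by a comprehension.
import Mathlib
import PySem

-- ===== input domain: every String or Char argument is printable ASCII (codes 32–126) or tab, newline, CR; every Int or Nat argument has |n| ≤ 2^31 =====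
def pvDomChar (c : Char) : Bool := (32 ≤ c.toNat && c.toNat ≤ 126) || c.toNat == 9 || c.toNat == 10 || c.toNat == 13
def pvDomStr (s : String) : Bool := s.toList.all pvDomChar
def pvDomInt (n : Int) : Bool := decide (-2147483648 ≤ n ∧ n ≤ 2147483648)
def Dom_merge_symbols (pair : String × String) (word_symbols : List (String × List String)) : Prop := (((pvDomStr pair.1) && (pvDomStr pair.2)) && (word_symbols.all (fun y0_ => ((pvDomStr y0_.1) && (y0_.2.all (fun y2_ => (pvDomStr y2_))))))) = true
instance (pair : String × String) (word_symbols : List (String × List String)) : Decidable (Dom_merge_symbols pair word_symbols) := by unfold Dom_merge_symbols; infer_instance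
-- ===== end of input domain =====

-- B replaces A's index-with-lookahead while loop by a single forward pass with a
-- one-symbol 'pending' carry (alternative decomposition, same cost).


-- ===== PORT A =====
-- A's while loop: indices i / i+2 / i+1 over symbols, appending to new_symbols (acc).
-- (fuel = symbols.length bounds the while loop: each iteration advances i by 1 or 2)
def mergeLoopA (s1 s2 ns : String) (symbols : List String) : Nat → Nat → List String → List String
  | 0, _, acc => acc
  | fuel + 1, i, acc =>
    if i < symbols.length then
      if i < symbols.length - 1 ∧ symbols.getD i "" = s1 ∧ symbols.getD (i + 1) "" = s2 then
        mergeLoopA s1 s2 ns symbols fuel (i + 2) (acc ++ [ns])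
      else
        mergeLoopA s1 s2 ns symbols fuel (i + 1) (acc ++ [symbols.getD i ""])
    else acc

def merge_symbols (pair : String × String) (word_symbols : List (String × List String)) : (List (String × List String)) × String :=
  let symbol1 := pair.1
  let symbol2 := pair.2
  let y_clean := if PySem.Str.startswith symbol2 "##" then PySem.Str.slice symbol2 (some 2) none else symbol2
  let new_symbol := symbol1 ++ y_clean
  let new_word_symbols :=
    word_symbols.foldl
      (fun (d : PySem.Dict String (List String)) p =>
        d.insert p.1 (mergeLoopA symbol1 symbol2 new_symbol p.2 p.2.length 0 []))
      PySem.Dict.empty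
  (new_word_symbols.items, new_symbol)

-- ===== PORT B =====
-- B's loop body: state (out, pending); 'pending' = an unconsumed symbol1 was just seen.
def mergeStepB (s1 s2 ns : String) (st : List String × Bool) (s : String) : List String × Bool :=
  if st.2 then
    if s = s2 then (st.1 ++ [ns], false)
    else if s = s1 then (st.1 ++ [s1], true)
    else (st.1 ++ [s1, s], false)
  else if s = s1 then (st.1, true)
  else (st.1 ++ [s], false)

def mergedB (s1 s2 ns : String) (symbols : List String) : List String :=
  let st := symbols.foldl (mergeStepB s1 s2 ns) ([], false)
  if st.2 then st.1 ++ [s1] else st.1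

def merge_symbols_alt (pair : String × String) (word_symbols : List (String × List String)) : (List (String × List String)) × String :=
  let symbol1 := pair.1
  let symbol2 := pair.2
  let new_symbol := symbol1 ++ (if PySem.Str.startswith symbol2 "##" then PySem.Str.slice symbol2 (some 2) none else symbol2)
  ((word_symbols.foldl
      (fun (d : PySem.Dict String (List String)) p =>
        d.insert p.1 (mergedB symbol1 symbol2 new_symbol p.2))
      PySem.Dict.empty).items, new_symbol)

-- ===== PRECONDITION & SPEC =====
def Spec_merge_symbols (pair : String × String) (word_symbols : List (String × List String)) (out : (List (String × List String)) × String) : Prop := out = merge_symbols_alt pair word_symbols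
instance (pair : String × String) (word_symbols : List (String × List String)) (out : (List (String × List String)) × String) : Decidable (Spec_merge_symbols pair word_symbols out) := by unfold Spec_merge_symbols; infer_instance

-- ===== CLAIM (what is proved, stated in full; the proofs are below) =====
def Claim_equal_merge_symbols : Prop := ∀ (pair : String × String) (word_symbols : List (String × List String)), Dom_merge_symbols pair word_symbols → Spec_merge_symbols pair word_symbols (merge_symbols pair word_symbols)

-- ===== LEMMAS AND PROOFS =====

-- Common functional form of the merged symbol list, used as a bridge between the two loops.
def mRec (s1 s2 ns : String) : List String → List String
  | [] => []
  | [x] => [x]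
  | x :: y :: rest =>
    if x = s1 ∧ y = s2 then ns :: mRec s1 s2 ns rest
    else x :: mRec s1 s2 ns (y :: rest)

theorem mRec_cons_of_ne (s1 s2 ns x : String) (l : List String) (hx : x ≠ s1) :
    mRec s1 s2 ns (x :: l) = x :: mRec s1 s2 ns l := by
  cases l with
  | nil => rfl
  | cons y r =>
    simp only [mRec]
    rw [if_neg (fun h => hx h.1)]

theorem mergeLoopA_eq_mRec (s1 s2 ns : String) (symbols : List String) :
    ∀ n i acc, symbols.length - i ≤ n →
      mergeLoopA s1 s2 ns symbols n i acc = acc ++ mRec s1 s2 ns (symbols.drop i) := by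
  intro n
  induction n with
  | zero =>
    intro i acc h
    have hi : symbols.length ≤ i := by omega
    rw [mergeLoopA]
    simp [List.drop_of_length_le hi, mRec]
  | succ n ih =>
    intro i acc h
    rw [mergeLoopA]
    by_cases hi : i < symbols.length
    · have hdrop : symbols.drop i = symbols[i] :: symbols.drop (i + 1) :=
        List.drop_eq_getElem_cons hi
      by_cases hc : i < symbols.length - 1 ∧ symbols.getD i "" = s1 ∧ symbols.getD (i + 1) "" = s2
      · obtain ⟨h1, h2, h3⟩ := hc
        have hi1 : i + 1 < symbols.length := by omega
        have hdrop1 : symbols.drop (i + 1) = symbols[i + 1] :: symbols.drop (i + 2) :=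
          List.drop_eq_getElem_cons hi1
        have e1 : symbols[i] = s1 := by rwa [List.getD_eq_getElem _ _ hi] at h2
        have e2 : symbols[i + 1] = s2 := by rwa [List.getD_eq_getElem _ _ hi1] at h3
        rw [if_pos hi, if_pos ⟨h1, h2, h3⟩, ih (i + 2) (acc ++ [ns]) (by omega),
          hdrop, hdrop1, e1, e2]
        simp [mRec]
      · rw [if_pos hi, if_neg hc, ih (i + 1) (acc ++ [symbols.getD i ""]) (by omega), hdrop]
        rcases Nat.lt_or_ge i (symbols.length - 1) with hlt | hge
        · -- two elements remain but the pair does not match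
          have hi1 : i + 1 < symbols.length := by omega
          have hdrop1 : symbols.drop (i + 1) = symbols[i + 1] :: symbols.drop (i + 2) :=
            List.drop_eq_getElem_cons hi1
          have hnm : ¬ (symbols[i] = s1 ∧ symbols[i + 1] = s2) := by
            intro ⟨a, b⟩
            exact hc ⟨hlt, by rw [List.getD_eq_getElem _ _ hi]; exact a,
              by rw [List.getD_eq_getElem _ _ hi1]; exact b⟩
          rw [hdrop1]
          simp [mRec, hnm, List.getElem?_eq_getElem hi]
        · -- last element
          have : symbols.drop (i + 1) = [] := List.drop_of_length_le (by omega)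
          rw [this]
          simp [mRec, List.getElem?_eq_getElem hi]
    · simp only [if_neg hi]
      rw [List.drop_of_length_le (by omega)]
      simp [mRec]

-- One-pass machine (B) computes mRec; the two conjuncts track the pending flag.
theorem mergeStepB_fin (s1 s2 ns : String) (l : List String) :
    ∀ out,
      ((if (l.foldl (mergeStepB s1 s2 ns) (out, false)).2
          then (l.foldl (mergeStepB s1 s2 ns) (out, false)).1 ++ [s1]
          else (l.foldl (mergeStepB s1 s2 ns) (out, false)).1) = out ++ mRec s1 s2 ns l)
      ∧ ((if (l.foldl (mergeStepB s1 s2 ns) (out, true)).2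
          then (l.foldl (mergeStepB s1 s2 ns) (out, true)).1 ++ [s1]
          else (l.foldl (mergeStepB s1 s2 ns) (out, true)).1) = out ++ mRec s1 s2 ns (s1 :: l)) := by
  induction l with
  | nil => intro out; simp [mRec]
  | cons s l ih =>
    intro out
    constructor
    · by_cases h1 : s = s1
      · have hstep : mergeStepB s1 s2 ns (out, false) s = (out, true) := by
          simp [mergeStepB, h1]
        rw [List.foldl_cons, hstep, h1]
        exact (ih out).2
      · have hstep : mergeStepB s1 s2 ns (out, false) s = (out ++ [s], false) := by
          simp [mergeStepB, if_neg h1]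
        rw [List.foldl_cons, hstep, (ih (out ++ [s])).1,
          mRec_cons_of_ne s1 s2 ns s l h1]
        simp
    · by_cases h2 : s = s2
      · have hstep : mergeStepB s1 s2 ns (out, true) s = (out ++ [ns], false) := by
          simp [mergeStepB, h2]
        rw [List.foldl_cons, hstep, (ih (out ++ [ns])).1, h2]
        simp [mRec]
      · by_cases h1 : s = s1
        · have hstep : mergeStepB s1 s2 ns (out, true) s = (out ++ [s1], true) := by
            simp [mergeStepB, if_neg h2, if_pos h1]
          rw [List.foldl_cons, hstep, (ih (out ++ [s1])).2, h1]
          simp only [mRec, List.append_assoc, List.singleton_append]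
          simp
          exact fun h => absurd (h1.trans h) h2
        · have hstep : mergeStepB s1 s2 ns (out, true) s = (out ++ [s1, s], false) := by
            simp [mergeStepB, if_neg h2, if_neg h1]
          rw [List.foldl_cons, hstep, (ih (out ++ [s1, s])).1]
          simp only [mRec, mRec_cons_of_ne s1 s2 ns s l h1]
          simp
          exact h2

theorem mergedB_eq_mRec (s1 s2 ns : String) (symbols : List String) :
    mergedB s1 s2 ns symbols = mRec s1 s2 ns symbols := by
  have := (mergeStepB_fin s1 s2 ns symbols []).1
  simpa [mergedB] using this

theorem mergeLoopA_eq_mergedB (s1 s2 ns : String) (symbols : List String) :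
    mergeLoopA s1 s2 ns symbols symbols.length 0 [] = mergedB s1 s2 ns symbols := by
  rw [mergedB_eq_mRec, mergeLoopA_eq_mRec s1 s2 ns symbols symbols.length 0 [] (by omega)]
  simp

-- ===== VERDICT (by name: the statement is the Claim_ definition above) =====
theorem merge_symbols_spec : Claim_equal_merge_symbols := by
  intro pair word_symbols _
  unfold Spec_merge_symbols merge_symbols merge_symbols_alt
  have hfun :
      (fun (d : PySem.Dict String (List String)) (p : String × List String) =>
        d.insert p.1 (mergeLoopA pair.1 pair.2
          (pair.1 ++ (if PySem.Str.startswith pair.2 "##" then PySem.Str.slice pair.2 (some 2) none else pair.2)) p.2 p.2.length 0 []))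
      = (fun (d : PySem.Dict String (List String)) (p : String × List String) =>
        d.insert p.1 (mergedB pair.1 pair.2
          (pair.1 ++ (if PySem.Str.startswith pair.2 "##" then PySem.Str.slice pair.2 (some 2) none else pair.2)) p.2)) := by
    funext d p
    rw [mergeLoopA_eq_mergedB]
  simp only []
  rw [hfun]
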